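-- pv_equiv track=rewrite | github.com/MrBrantCode/unitest_baseline | mut_generate/mist_train_taco/taco_6354/solution.py | transform_chewbacca_number
-- ===== SOURCE A (Python) =====
-- def transform_chewbacca_number(x: int) -> int:
--     # Convert the number to a list of its digits
--     digits = [int(d) for d in str(x)]
--
--     # Iterate over each digit and apply the inversion rule
--     for i, digit in enumerate(digits):
--         if i == 0 and digit == 9:
--             continue  # Skip the first digit if it's 9 to avoid leading zero
--         if digit > 4:
--             digits[i] = 9 - digit
--
--     # Convert the list of digits back to an integer
--     transformed_number = int(''.join(str(d) for d in digits))
--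
--     return transformed_number
-- ===== SOURCE B (Python) =====
-- def transform_chewbacca_number(x: int) -> int:
--     # Arithmetic right-to-left digit extraction; the output string is built
--     # back-to-front by prepending, and the leading digit is recognised as the
--     # point where the quotient runs out (a leading 9 is kept).
--     if x < 0:
--         raise ValueError("negative numbers have no plain digit string")
--     s = ''
--     while True:
--         x, d = divmod(x, 10)
--         t = 9 - d if d > 4 else d
--         if x == 0:
--             return int(str(d if d == 9 else t) + s)
--         s = str(t) + s
-- ===== Notes on version B (the rewrite author's own statement) =====
-- stated objective: alternative
-- what changed: B never builds str(x) or a digit list: it extracts digits arithmetically right-to-left with divmod, prepends each transformed digit to the output string, and detects the leading digit as the step where the quotient runs out (keeping a leading 9), instead of A's left-to-right enumerate loop over a mutable list of int digits.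
import Mathlib
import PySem

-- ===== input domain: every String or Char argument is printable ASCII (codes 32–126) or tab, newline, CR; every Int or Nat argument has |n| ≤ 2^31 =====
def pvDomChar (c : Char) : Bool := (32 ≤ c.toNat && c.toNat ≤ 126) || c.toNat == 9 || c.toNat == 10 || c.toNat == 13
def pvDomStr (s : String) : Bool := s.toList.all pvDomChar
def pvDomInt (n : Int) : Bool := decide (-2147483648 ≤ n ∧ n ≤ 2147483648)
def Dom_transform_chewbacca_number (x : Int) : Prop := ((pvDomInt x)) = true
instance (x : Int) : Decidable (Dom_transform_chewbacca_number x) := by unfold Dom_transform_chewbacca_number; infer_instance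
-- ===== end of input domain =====

-- B extracts the digits arithmetically right-to-left with divmod and builds the output
-- string back-to-front, instead of A's left-to-right loop over a list of int digits
-- (objective: alternative; same cost).

-- ===== PORT A =====
def transform_chewbacca_number (x : Int) : Int :=
  -- digits = [int(d) for d in str(x)]   (int('-') raises ValueError: none, excluded by Pre_)
  match (PySem.Int.toChars x).mapM (fun c => PySem.Int.ofChars? [c]) with
  | none => 0
  | some digits =>
      -- for i, digit in enumerate(digits): skip (i==0 and digit==9); digits[i] = 9-digit if digit>4
      let digits := (PySem.List.enumerate digits 0).map
        (fun p => if p.1 == 0 && p.2 == 9 then p.2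
                  else if p.2 > 4 then 9 - p.2 else p.2)
      -- int(''.join(str(d) for d in digits))
      (PySem.Int.ofChars? (digits.flatMap (fun d => PySem.Int.toChars d))).getD 0

-- ===== PORT B =====
-- the while loop of Source B; x ≥ 0 is guaranteed by the guard in transform_chewbacca_number_alt,
-- so Python's divmod(x, 10) is exactly Nat division/remainder here
def pvBLoop (x : Nat) (s : List Char) : Int :=
  -- x, d = divmod(x, 10); t = 9 - d if d > 4 else d
  let d := x % 10
  let x' := x / 10
  let t : Int := if (d : Int) > 4 then 9 - (d : Int) else (d : Int)
  if _h : x' = 0 then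
    -- return int(str(d if d == 9 else t) + s)
    (PySem.Int.ofChars? (PySem.Int.toChars (if d = 9 then (d : Int) else t) ++ s)).getD 0
  else
    -- s = str(t) + s
    pvBLoop x' (PySem.Int.toChars t ++ s)
termination_by x
decreasing_by exact Nat.div_lt_self (by omega) (by omega)

def transform_chewbacca_number_alt (x : Int) : Int :=
  if x < 0 then 0   -- Python raises ValueError here; outside Pre_
  else pvBLoop x.toNat []

-- ===== PRECONDITION & SPEC =====
-- A raises ValueError on negative x (int('-')); Pre_ admits exactly the nonnegative inputs.
def Pre_transform_chewbacca_number (x : Int) : Prop := 0 ≤ x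
instance (x : Int) : Decidable (Pre_transform_chewbacca_number x) := by unfold Pre_transform_chewbacca_number; infer_instance
def pvWitness_transform_chewbacca_number : Int := 95

def Spec_transform_chewbacca_number (x : Int) (out : Int) : Prop := out = transform_chewbacca_number_alt x
instance (x : Int) (out : Int) : Decidable (Spec_transform_chewbacca_number x out) := by unfold Spec_transform_chewbacca_number; infer_instance

-- ===== CLAIM =====
def Claim_equal_transform_chewbacca_number : Prop := ∀ (x : Int), Dom_transform_chewbacca_number x → Pre_transform_chewbacca_number x → Spec_transform_chewbacca_number x (transform_chewbacca_number x)

-- ===== LEMMAS AND PROOFS =====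

-- every char produced by Nat.toDigits 10 is the digitChar of some d < 10
def pvIsDig (c : Char) : Prop := ∃ d : Nat, d < 10 ∧ c = Nat.digitChar d

theorem pv_core_mem : ∀ (f n : Nat) (l : List Char), (∀ c ∈ l, pvIsDig c) →
    ∀ c ∈ Nat.toDigitsCore 10 f n l, pvIsDig c := by
  intro f
  induction f with
  | zero => intro n l hl c hc; simp [Nat.toDigitsCore] at hc; exact hl c hc
  | succ f ih =>
    intro n l hl c hc
    simp only [Nat.toDigitsCore] at hc
    by_cases h : n / 10 = 0
    · simp [h] at hc
      rcases hc with hc | hc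
      · exact ⟨n % 10, Nat.mod_lt _ (by omega), hc⟩
      · exact hl c hc
    · simp [h] at hc
      refine ih (n / 10) _ ?_ c hc
      intro c' hcm
      rcases List.mem_cons.mp hcm with rfl | hcm
      · exact ⟨n % 10, Nat.mod_lt _ (by omega), rfl⟩
      · exact hl c' hcm

theorem pv_toDigits_mem (n : Nat) : ∀ c ∈ Nat.toDigits 10 n, pvIsDig c := by
  intro c hc
  exact pv_core_mem (n + 1) n [] (by simp) c hc

theorem pv_toDigits_ne_nil (n : Nat) : Nat.toDigits 10 n ≠ [] := by
  have := @Nat.length_toDigits_pos 10 n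
  intro h
  rw [h] at this
  simp at this

-- the per-char value int(c); A's digit list is cs.map pvVal
def pvVal (c : Char) : Int := (PySem.Int.ofChars? [c]).getD 0

theorem pv_ofChars_digit (d : Nat) (hd : d < 10) :
    PySem.Int.ofChars? [Nat.digitChar d] = some (d : Int) := by
  interval_cases d <;> decide

theorem pv_mapM_digits : ∀ (cs : List Char), (∀ c ∈ cs, pvIsDig c) →
    cs.mapM (fun c => PySem.Int.ofChars? [c]) = some (cs.map pvVal) := by
  intro cs
  induction cs with
  | nil => intro _; rfl
  | cons c rest ih =>
    intro h
    obtain ⟨d, hd, rfl⟩ := h c (by simp)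
    rw [List.mapM_cons]
    rw [ih (fun c' hc' => h c' (List.mem_cons_of_mem _ hc'))]
    simp [pvVal, pv_ofChars_digit d hd]

-- str.maketrans-style digit inversion on a char, used only as proof vocabulary
def pvInvChar (c : Char) : Char :=
  if c == '5' then '4' else if c == '6' then '3' else if c == '7' then '2'
  else if c == '8' then '1' else if c == '9' then '0' else c

-- str of the inverted digit = inverted char
theorem pv_inv_char (d : Nat) (hd : d < 10) :
    PySem.Int.toChars (if (d : Int) > 4 then 9 - (d : Int) else (d : Int))
      = [pvInvChar (Nat.digitChar d)] := by
  interval_cases d <;> decide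

theorem pv_val_digit (d : Nat) (hd : d < 10) : pvVal (Nat.digitChar d) = (d : Int) := by
  simp [pvVal, pv_ofChars_digit d hd]

def pvTf (p : Int × Int) : Int :=
  if p.1 == 0 && p.2 == 9 then p.2 else if p.2 > 4 then 9 - p.2 else p.2

theorem pv_tail : ∀ (cs : List Char) (s : Int), 1 ≤ s → (∀ c ∈ cs, pvIsDig c) →
    ((PySem.List.enumerate (cs.map pvVal) s).map pvTf).flatMap (fun d => PySem.Int.toChars d)
      = cs.map pvInvChar := by
  intro cs
  induction cs with
  | nil => intro s _ _; rfl
  | cons c rest ih =>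
    intro s hs h
    obtain ⟨d, hd, rfl⟩ := h c (by simp)
    rw [List.map_cons, PySem.List.enumerate_cons, List.map_cons, List.flatMap_cons]
    have hs0 : (s == 0) = false := by simp; omega
    rw [ih (s + 1) (by omega) (fun c' hc' => h c' (List.mem_cons_of_mem _ hc'))]
    rw [pv_val_digit d hd]
    simp only [pvTf, hs0, Bool.false_and, Bool.false_eq_true, if_false]
    rw [pv_inv_char d hd]
    rfl

theorem pv_digitChar_eq_nine (d : Nat) (hd : d < 10) :
    ((Nat.digitChar d == '9') = true) ↔ d = 9 := by
  interval_cases d <;> decide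

-- the character string A ends up joining, as a function of the digit-char list
def pvTL (cs : List Char) : List Char :=
  if PySem.List.pyGet? cs 0 == some '9'
  then '9' :: PySem.List.slice (cs.map pvInvChar) (some 1) none
  else cs.map pvInvChar

-- A's joined list = pvTL of str(x)'s chars
theorem pv_main (cs : List Char) (hne : cs ≠ []) (h : ∀ c ∈ cs, pvIsDig c) :
    ((PySem.List.enumerate (cs.map pvVal) 0).map pvTf).flatMap (fun d => PySem.Int.toChars d)
      = pvTL cs := by
  match cs with
  | [] => exact absurd rfl hne
  | c :: rest =>
    obtain ⟨d, hd, rfl⟩ := h c (by simp)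
    unfold pvTL
    rw [List.map_cons, PySem.List.enumerate_cons, List.map_cons, List.flatMap_cons]
    rw [show (0 : Int) + 1 = 1 from rfl]
    rw [pv_tail rest 1 (by omega) (fun c' hc' => h c' (List.mem_cons_of_mem _ hc'))]
    rw [pv_val_digit d hd]
    rw [PySem.List.pyGet?_zero_cons]
    by_cases h9 : d = 9
    · subst h9
      have h1 : pvTf (0, ((9 : Nat) : Int)) = 9 := by decide
      have h2 : (some (Nat.digitChar 9) == some '9') = true := by decide
      rw [h1, h2, if_pos rfl]
      rw [List.map_cons, PySem.List.slice_from_one, List.tail_cons]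
      have h3 : PySem.Int.toChars 9 = ['9'] := by decide
      rw [h3]
      rfl
    · have hc9 : (some (Nat.digitChar d) == some '9') = false := by
        rcases Bool.eq_false_or_eq_true (Nat.digitChar d == '9') with hb | hb
        · exact absurd ((pv_digitChar_eq_nine d hd).mp hb) h9
        · simpa using hb
      have hd9 : (((d : Int)) == 9) = false := by simp; omega
      rw [hc9]
      simp only [Bool.false_eq_true, if_false]
      simp only [pvTf, hd9, Bool.and_false, Bool.false_eq_true, if_false]
      rw [pv_inv_char d hd]
      rfl

-- peeling the last digit off toDigits commutes with pvTL up to an appended inverted char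
theorem pv_TL_append (n : Nat) (hn : 10 ≤ n) :
    pvTL (Nat.toDigits 10 n)
      = pvTL (Nat.toDigits 10 (n / 10)) ++ [pvInvChar (Nat.digitChar (n % 10))] := by
  have hsplit : Nat.toDigits 10 n
      = Nat.toDigits 10 (n / 10) ++ [Nat.digitChar (n % 10)] := by
    rw [Nat.toDigits_eq_if (by omega), if_neg (by omega)]
  obtain ⟨c, rest, hc⟩ : ∃ c rest, Nat.toDigits 10 (n / 10) = c :: rest := by
    cases h : Nat.toDigits 10 (n / 10) with
    | nil => exact absurd h (pv_toDigits_ne_nil _)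
    | cons c rest => exact ⟨c, rest, rfl⟩
  rw [hsplit, hc]
  unfold pvTL
  rw [List.cons_append, PySem.List.pyGet?_zero_cons, PySem.List.pyGet?_zero_cons]
  by_cases h9 : (some c == some '9') = true
  · rw [if_pos h9, if_pos h9]
    rw [List.map_cons, List.map_append, List.map_cons]
    rw [PySem.List.slice_from_one, PySem.List.slice_from_one]
    simp
  · rw [if_neg h9, if_neg h9]
    simp

-- Source B's loop computes int(pvTL(digits of n) + s)
theorem pv_loop_eq : ∀ (n : Nat) (s : List Char),
    pvBLoop n s = (PySem.Int.ofChars? (pvTL (Nat.toDigits 10 n) ++ s)).getD 0 := by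
  intro n
  induction n using Nat.strong_induction_on with
  | _ n ih =>
    intro s
    by_cases h : n / 10 = 0
    · have hn : n < 10 := by omega
      rw [pvBLoop]
      rw [dif_pos h]
      have hdig : Nat.toDigits 10 n = [Nat.digitChar n] := Nat.toDigits_of_lt_base hn
      rw [Nat.mod_eq_of_lt hn, hdig]
      by_cases h9 : n = 9
      · subst h9; rfl
      · rw [if_neg h9]
        unfold pvTL
        rw [PySem.List.pyGet?_zero_cons]
        have hc9 : (some (Nat.digitChar n) == some '9') = false := by
          rcases Bool.eq_false_or_eq_true (Nat.digitChar n == '9') with hb | hb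
          · exact absurd ((pv_digitChar_eq_nine n hn).mp hb) h9
          · simpa using hb
        rw [hc9]
        simp only [Bool.false_eq_true, if_false]
        rw [List.map_cons, List.map_nil, pv_inv_char n hn]
    · have hn : 10 ≤ n := by
        by_contra hlt
        exact h (Nat.div_eq_of_lt (by omega))
      rw [pvBLoop]
      rw [dif_neg h]
      rw [ih (n / 10) (Nat.div_lt_self (by omega) (by omega))]
      rw [pv_inv_char (n % 10) (Nat.mod_lt _ (by omega))]
      rw [pv_TL_append n hn]
      simp

-- ===== VERDICT =====
theorem transform_chewbacca_number_spec : Claim_equal_transform_chewbacca_number := by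
  intro x _ hpre
  unfold Pre_transform_chewbacca_number at hpre
  unfold Spec_transform_chewbacca_number transform_chewbacca_number transform_chewbacca_number_alt
  rw [if_neg (by omega)]
  have hx : PySem.Int.toChars x = Nat.toDigits 10 x.toNat := by
    unfold PySem.Int.toChars
    rw [if_neg (by omega)]
  rw [hx]
  rw [pv_mapM_digits _ (pv_toDigits_mem x.toNat)]
  show (PySem.Int.ofChars?
      ((((PySem.List.enumerate ((Nat.toDigits 10 x.toNat).map pvVal) 0).map pvTf).flatMap
        (fun d => PySem.Int.toChars d)))).getD 0 = _
  rw [pv_main (Nat.toDigits 10 x.toNat) (pv_toDigits_ne_nil x.toNat) (pv_toDigits_mem x.toNat)]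
  rw [pv_loop_eq x.toNat []]
  rw [List.append_nil]
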